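-- pv_equiv track=rewrite | github.com/jonhuth/dsa | Sorting/convex_hull.py | get_p0
-- ===== SOURCE A (Python) =====
-- def get_p0(points):
--     p0 = points[0]
--     for point in points:
--         x_coord, y_coord = point
--         if y_coord < p0[1]:
--             p0 = point
--         elif y_coord == p0[1] and x_coord < p0[0]:
--             p0 = point
--
--     return p0
-- ===== SOURCE B (Python) =====
-- def get_p0(points):
--     return sorted(points, key=lambda p: (p[1], p[0]))[0]
-- ===== Notes on version B (the rewrite author's own statement) =====
-- stated objective: idiomatic
-- what changed: Replaces the manual extremum-scan loop (with explicit tie-break branches) by a stable sort on the (y, x) key followed by taking the first element.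
-- outside the precondition, e.g. on get_p0([]): A raises IndexError, B raises IndexError
import Mathlib
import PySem

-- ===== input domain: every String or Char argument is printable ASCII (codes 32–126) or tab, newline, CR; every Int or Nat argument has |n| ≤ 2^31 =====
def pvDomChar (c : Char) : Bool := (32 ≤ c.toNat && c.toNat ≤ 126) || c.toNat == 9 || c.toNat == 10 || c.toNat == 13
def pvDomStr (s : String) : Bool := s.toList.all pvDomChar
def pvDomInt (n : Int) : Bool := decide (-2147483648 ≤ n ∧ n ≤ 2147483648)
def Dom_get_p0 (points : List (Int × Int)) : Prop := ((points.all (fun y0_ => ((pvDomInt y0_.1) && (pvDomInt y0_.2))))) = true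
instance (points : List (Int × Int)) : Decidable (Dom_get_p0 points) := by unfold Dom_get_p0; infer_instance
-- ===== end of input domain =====

-- B replaces A's manual minimum-scan (with explicit tie-break branches) by a stable
-- sort on the (y, x) key followed by taking the first element (idiomatic; not faster).


-- ===== PORT A =====
-- p0 = points[0]; then the loop updates p0 when y < p0[1], or y == p0[1] and x < p0[0].
def get_p0 (points : List (Int × Int)) : Int × Int :=
  match points with
  | [] => (0, 0)  -- Python raises IndexError here; excluded by Pre_get_p0
  | p :: _ =>
    points.foldl
      (fun p0 point =>
        if point.2 < p0.2 then point
        else if point.2 == p0.2 && point.1 < p0.1 then point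
        else p0) p

-- ===== PORT B =====
-- return sorted(points, key=lambda p: (p[1], p[0]))[0]
def get_p0_alt (points : List (Int × Int)) : Int × Int :=
  (PySem.List.sorted2 points (fun p => p.2) (fun p => p.1)).headD (0, 0)
  -- headD: Python's [0] raises IndexError on []; excluded by Pre_get_p0

-- ===== PRECONDITION & SPEC =====
-- Pre_ excludes the empty list, on which both A (points[0]) and B ([0]) raise IndexError.
def Pre_get_p0 (points : List (Int × Int)) : Prop := points ≠ []
instance (points : List (Int × Int)) : Decidable (Pre_get_p0 points) := by unfold Pre_get_p0; infer_instance
def pvWitness_get_p0 : (List (Int × Int)) := ([(1, 2), (0, 2), (3, -1)])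

def Spec_get_p0 (points : List (Int × Int)) (out : Int × Int) : Prop := out = get_p0_alt points
instance (points : List (Int × Int)) (out : Int × Int) : Decidable (Spec_get_p0 points out) := by unfold Spec_get_p0; infer_instance

-- ===== CLAIM (what is proved, stated in full; the proofs are below) =====
def Claim_equal_get_p0 : Prop := ∀ (points : List (Int × Int)), Dom_get_p0 points → Pre_get_p0 points → Spec_get_p0 points (get_p0 points)

-- ===== LEMMAS AND PROOFS =====

-- the strict "comes before" test used by the stable insertion sort on key (y, x)
def pvLt (a b : Int × Int) : Bool :=
  decide (a.2 < b.2) || (!decide (b.2 < a.2) && decide (a.1 < b.1))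

theorem pvLt_irrefl (a : Int × Int) : pvLt a a = false := by
  simp [pvLt]

theorem pvLt_trans {a b c : Int × Int} (h1 : pvLt a b = true) (h2 : pvLt b c = true) :
    pvLt a c = true := by
  simp only [pvLt, Bool.or_eq_true, Bool.and_eq_true, Bool.not_eq_true',
    decide_eq_true_eq, decide_eq_false_iff_not] at *
  omega

theorem pvLt_antisymm {a b : Int × Int} (h1 : pvLt a b = false) (h2 : pvLt b a = false) :
    a = b := by
  simp only [pvLt, Bool.or_eq_false_iff, Bool.and_eq_false_iff, Bool.not_eq_false',
    decide_eq_false_iff_not, decide_eq_true_eq] at *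
  obtain ⟨a1, a2⟩ := a; obtain ⟨b1, b2⟩ := b
  simp only [Prod.mk.injEq]
  omega

-- A's update condition is exactly pvLt point p0
theorem stepA_eq (p0 point : Int × Int) :
    (if point.2 < p0.2 then point
     else if point.2 == p0.2 && point.1 < p0.1 then point else p0)
    = (if pvLt point p0 then point else p0) := by
  simp only [pvLt, Bool.or_eq_true, Bool.and_eq_true, Bool.not_eq_true',
    decide_eq_true_eq, decide_eq_false_iff_not, beq_iff_eq]
  split_ifs <;> first | rfl | omega

-- A's fold returns a member of {init} ∪ l
theorem foldA_mem (l : List (Int × Int)) (a : Int × Int) :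
    l.foldl (fun p0 point => if pvLt point p0 then point else p0) a = a ∨
    l.foldl (fun p0 point => if pvLt point p0 then point else p0) a ∈ l := by
  induction l generalizing a with
  | nil => exact Or.inl rfl
  | cons x t ih =>
    simp only [List.foldl_cons, List.mem_cons]
    rcases ih (if pvLt x a then x else a) with h | h
    · rw [h]; split_ifs with hx
      · exact Or.inr (Or.inl rfl)
      · exact Or.inl rfl
    · exact Or.inr (Or.inr h)

-- x strictly before F and not strictly before a implies a strictly before F
theorem pvLt_le_trans {x a F : Int × Int} (h1 : pvLt x F = true) (h2 : pvLt x a = false) :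
    pvLt a F = true := by
  simp only [pvLt, Bool.or_eq_true, Bool.or_eq_false_iff, Bool.and_eq_true,
    Bool.and_eq_false_iff, Bool.not_eq_true', Bool.not_eq_false',
    decide_eq_true_eq, decide_eq_false_iff_not] at *
  omega

-- A's fold result is minimal: nothing in {init} ∪ l comes strictly before it
theorem foldA_min (l : List (Int × Int)) :
    ∀ a q, (q = a ∨ q ∈ l) →
    pvLt q (l.foldl (fun p0 point => if pvLt point p0 then point else p0) a) = false := by
  induction l with
  | nil =>
    intro a q hq
    rcases hq with rfl | h
    · exact pvLt_irrefl q
    · cases h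
  | cons x t ih =>
    intro a q hq
    simp only [List.foldl_cons]
    by_cases hx : pvLt x a = true
    · rw [if_pos hx]
      rcases hq with rfl | hq
      · by_contra hqa
        rw [Bool.not_eq_false] at hqa
        have hxF : pvLt x (t.foldl (fun p0 point => if pvLt point p0 then point else p0) x) = true :=
          pvLt_trans hx hqa
        exact absurd hxF (by simpa using ih x x (Or.inl rfl))
      · rcases List.mem_cons.mp hq with rfl | hq
        · exact ih q q (Or.inl rfl)
        · exact ih x q (Or.inr hq)
    · rw [if_neg hx]
      rcases hq with rfl | hq
      · exact ih q q (Or.inl rfl)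
      · rcases List.mem_cons.mp hq with rfl | hq
        · by_contra hqr
          rw [Bool.not_eq_false] at hqr
          have haF := pvLt_le_trans hqr (by simpa using hx)
          exact absurd haF (by simpa using ih a a (Or.inl rfl))
        · exact ih a q (Or.inr hq)

-- invariant of the insertion sort: every member of the accumulated list h :: t
-- satisfies ¬ pvLt q h (the head is minimal)
theorem insert_fold_min (l : List (Int × Int)) (acc : List (Int × Int))
    (hacc : ∀ h t, acc = h :: t → ∀ q ∈ acc, pvLt q h = false) :
    ∀ h t, l.foldl (fun acc x => PySem.List.insertBy pvLt x acc) acc = h :: t →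
      ∀ q ∈ l.foldl (fun acc x => PySem.List.insertBy pvLt x acc) acc, pvLt q h = false := by
  induction l generalizing acc with
  | nil => simpa using hacc
  | cons x rest ih =>
    simp only [List.foldl_cons]
    apply ih
    intro h t heq q hq
    cases acc with
    | nil =>
      simp only [PySem.List.insertBy] at heq hq
      cases heq
      simp only [List.mem_singleton] at hq
      subst hq; exact pvLt_irrefl q
    | cons y ys =>
      have hymin : ∀ q ∈ y :: ys, pvLt q y = false := hacc y ys rfl
      simp only [PySem.List.insertBy] at heq hq
      by_cases hxy : pvLt x y = true
      · rw [if_pos hxy] at heq hq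
        cases heq
        rcases List.mem_cons.mp hq with rfl | hq
        · exact pvLt_irrefl q
        · -- q ∈ y :: ys, ¬ pvLt q y; if pvLt q x then pvLt q y by trans with x < y
          by_contra hqx
          rw [Bool.not_eq_false] at hqx
          exact absurd (pvLt_trans hqx hxy) (by simpa using hymin q hq)
      · rw [if_neg hxy] at heq hq
        cases heq
        rcases List.mem_cons.mp hq with rfl | hq
        · exact pvLt_irrefl q
        · rcases (PySem.List.mem_insertBy pvLt x q _).mp hq with rfl | hq
          · simpa using hxy
          · exact hymin q (List.mem_cons_of_mem _ hq)

theorem sorted2_eq (points : List (Int × Int)) :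
    PySem.List.sorted2 points (fun p => p.2) (fun p => p.1) =
    points.foldl (fun acc x => PySem.List.insertBy pvLt x acc) [] := rfl

-- ===== VERDICT (by name: the statement is the Claim_ definition above) =====
theorem get_p0_spec : Claim_equal_get_p0 := by
  intro points _ hpre
  unfold Spec_get_p0
  match points, hpre with
  | p :: rest, _ =>
    set pts : List (Int × Int) := p :: rest with hpts
    -- B's side: sorted2 is a nonempty permutation of pts with a minimal head
    have hperm : (PySem.List.sorted2 pts (fun q => q.2) (fun q => q.1)).Perm pts :=
      PySem.List.sorted2_perm _ _ _ _
    cases hs : PySem.List.sorted2 pts (fun q => q.2) (fun q => q.1) with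
    | nil =>
      rw [hs] at hperm
      have : pts = [] := hperm.symm.eq_nil
      simp [hpts] at this
    | cons h t =>
      have hmem : h ∈ pts := hperm.mem_iff.mp (by rw [hs]; exact List.mem_cons_self ..)
      have hmin : ∀ q ∈ pts, pvLt q h = false := by
        have key := insert_fold_min pts [] (by intro h t heq; exact absurd heq (by simp)) h t
          (by rw [← sorted2_eq]; exact hs)
        intro q hq
        have hq2 : q ∈ PySem.List.sorted2 pts (fun q => q.2) (fun q => q.1) :=
          hperm.mem_iff.mpr hq
        rw [sorted2_eq] at hq2
        exact key q hq2
      -- A's side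
      have hA : get_p0 pts = pts.foldl (fun p0 point => if pvLt point p0 then point else p0) p := by
        show (p :: rest).foldl _ p = _
        congr 1
        funext p0 point
        exact stepA_eq p0 point
      have hAmem : get_p0 pts ∈ pts := by
        rw [hA]
        rcases foldA_mem pts p with he | he
        · rw [he]; simp [hpts]
        · exact he
      have hAmin : ∀ q ∈ pts, pvLt q (get_p0 pts) = false := by
        intro q hq
        rw [hA]
        exact foldA_min pts p q (Or.inr hq)
      have h1 : pvLt (get_p0 pts) h = false := hmin _ hAmem
      have h2 : pvLt h (get_p0 pts) = false := hAmin _ hmem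
      have heq : get_p0 pts = h := pvLt_antisymm h1 h2
      rw [heq]
      unfold get_p0_alt
      rw [hs]
      rfl
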